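-- pv_equiv track=rewrite | github.com/asukaminato0721/OJ | UVa/UVa12627/12627.py | f
-- ===== SOURCE A (Python) =====
-- from itertools import accumulate, repeat
-- from operator import mul
--
-- c = [1] + list(accumulate(repeat(3, 30), mul))
--
-- def f(k: int, i: int) -> int:
--     if i == 0:
--         return 0
--     if k == 0:
--         return 1
--     if i < 1 << (k - 1):
--         return 2 * f(k - 1, i)
--     else:
--         return f(k - 1, i - (1 << (k - 1))) + 2 * c[k - 1]
-- ===== SOURCE B (Python) =====
-- def f(k: int, i: int) -> int:
--     # Iterative descent: thread the accumulated power-of-two multiplier into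
--     # each additive term instead of applying it on the way back up.
--     total = 0
--     m = 1
--     while True:
--         if i == 0:
--             return total
--         if k == 0:
--             return total + m
--         if i < 1 << (k - 1):
--             m *= 2
--         else:
--             total += m * 2 * 3 ** (k - 1)
--             i -= 1 << (k - 1)
--         k -= 1
-- ===== Notes on version B (the rewrite author's own statement) =====
-- stated objective: simpler
-- what changed: Replaced the multiply-on-return recursion (with a precomputed accumulate table c) by a single iterative loop that threads an accumulated power-of-two multiplier and a running total downward, computing 3**(k-1) directly instead of indexing the table.
import Mathlib
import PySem

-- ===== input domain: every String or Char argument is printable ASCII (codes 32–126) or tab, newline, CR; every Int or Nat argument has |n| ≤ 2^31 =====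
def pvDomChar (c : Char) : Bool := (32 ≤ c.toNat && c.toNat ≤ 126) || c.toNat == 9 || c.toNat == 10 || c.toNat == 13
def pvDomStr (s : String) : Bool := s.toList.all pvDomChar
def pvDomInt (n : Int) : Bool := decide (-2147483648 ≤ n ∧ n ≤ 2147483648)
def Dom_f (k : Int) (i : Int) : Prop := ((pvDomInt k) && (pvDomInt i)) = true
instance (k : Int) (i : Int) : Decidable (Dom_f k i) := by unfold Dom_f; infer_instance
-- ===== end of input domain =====

-- B replaces A's multiply-on-return recursion and precomputed table by one accumulator loop; objective: simpler.

-- ===== PORT A =====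
-- itertools.accumulate(xs, mul): running products, first element is xs[0]
def pyAccumulateMul (xs : List Int) : List Int :=
  (xs.foldl (fun (st : List Int × Option Int) x =>
    match st.2 with
    | none => (st.1 ++ [x], some x)
    | some a => (st.1 ++ [a * x], some (a * x))) ([], none)).1

-- c = [1] + list(accumulate(repeat(3, 30), mul))
def cTab : List Int := [1] ++ pyAccumulateMul (List.replicate 30 3)

-- recursion on k (Python recurses with k-1 until k == 0); 1 << (k-1) = 2 ^ (k-1)
def fA : Nat → Int → Int
  | kn, i =>
    if i = 0 then 0
    else
      match kn with
      | 0 => 1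
      | k' + 1 =>
        if i < 2 ^ k' then 2 * fA k' i
        else fA k' (i - 2 ^ k') + 2 * ((PySem.List.pyGet? cTab (k' : Int)).getD 0)

def f (k : Int) (i : Int) : Int := fA k.toNat i

-- ===== PORT B =====
def fB : Nat → Int → Int → Int → Int
  | kn, i, total, m =>
    if i = 0 then total
    else
      match kn with
      | 0 => total + m
      | k' + 1 =>
        if i < 2 ^ k' then fB k' i total (m * 2)
        else fB k' (i - 2 ^ k') (total + m * 2 * 3 ^ k') m

def f_alt (k : Int) (i : Int) : Int := fB k.toNat i 0 1

-- ===== PRECONDITION & SPEC =====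
-- Pre_f excludes the inputs (inside Dom) on which A raises: negative k with i ≠ 0 (ValueError
-- from 1 << (k-1)), k ≥ 32 with i = 2^31 (IndexError on c[k-1]), and — since A recurses k deep —
-- k above 900, near CPython's recursion limit of 1000, where whether A returns or raises
-- RecursionError depends on the interpreter's stack state rather than on the function.
def Pre_f (k : Int) (i : Int) : Prop := i = 0 ∨ (0 ≤ k ∧ k ≤ 900 ∧ (i < 2147483648 ∨ k ≤ 31))
instance (k : Int) (i : Int) : Decidable (Pre_f k i) := by unfold Pre_f; infer_instance
def pvWitness_f : Int × Int := (5, 3)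

def Spec_f (k : Int) (i : Int) (out : Int) : Prop := out = f_alt k i
instance (k : Int) (i : Int) (out : Int) : Decidable (Spec_f k i out) := by unfold Spec_f; infer_instance

-- ===== CLAIM (what is proved, stated in full; the proofs are below) =====
def Claim_equal_f : Prop := ∀ (k : Int) (i : Int), Dom_f k i → Pre_f k i → Spec_f k i (f k i)

-- ===== LEMMAS AND PROOFS =====

theorem cTab_lookup : ∀ k' : Nat, k' < 31 → cTab[k']?.getD 0 = 3 ^ k' := by
  decide

theorem pow_index_small {i : Int} {k' : Nat} (h2 : 2 ^ k' ≤ i)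
    (h : i < 2147483648 ∨ k' + 1 ≤ 31) : k' < 31 := by
  rcases h with h | h
  · by_contra hk
    push Not at hk
    have : (2147483648 : Int) = 2 ^ 31 := by norm_num
    have h31 : (2 : Int) ^ 31 ≤ 2 ^ k' := pow_le_pow_right₀ (by norm_num) hk
    omega
  · omega

theorem fB_eq (kn : Nat) : ∀ (i total m : Int), (i < 2147483648 ∨ kn ≤ 31) →
    fB kn i total m = total + m * fA kn i := by
  induction kn with
  | zero =>
    intro i total m _
    by_cases hi : i = 0
    · simp [fB, fA, hi]
    · simp [fB, fA, hi]
  | succ k' ih =>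
    intro i total m h
    by_cases hi : i = 0
    · simp [fB, fA, hi]
    · by_cases hlt : i < 2 ^ k'
      · have h' : i < 2147483648 ∨ k' ≤ 31 := by omega
        rw [show fB (k' + 1) i total m = fB k' i total (m * 2) by
              simp [fB, hi, hlt],
            show fA (k' + 1) i = 2 * fA k' i by simp [fA, hi, hlt],
            ih i total (m * 2) h']
        ring
      · push Not at hlt
        have hk31 : k' < 31 := pow_index_small hlt h
        have h' : i - 2 ^ k' < 2147483648 ∨ k' ≤ 31 := by
          rcases h with h | h
          · left
            have : (0 : Int) < 2 ^ k' := by positivity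
            omega
          · right; omega
        rw [show fB (k' + 1) i total m
              = fB k' (i - 2 ^ k') (total + m * 2 * 3 ^ k') m by
              simp [fB, hi]; omega,
            show fA (k' + 1) i = fA k' (i - 2 ^ k') + 2 * 3 ^ k' by
              simp [fA, hi]
              rw [if_neg (by omega), cTab_lookup k' hk31],
            ih (i - 2 ^ k') (total + m * 2 * 3 ^ k') m h']
        ring

-- ===== VERDICT (by name: the statement is the Claim_ definition above) =====
theorem f_spec : Claim_equal_f := by
  intro k i _ hpre
  unfold Spec_f f f_alt
  by_cases hi : i = 0
  · rw [fA.eq_def, fB.eq_def]; simp [hi]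
  · rcases hpre with hpre | ⟨hk, -, hpre⟩
    · exact absurd hpre hi
    · have h : i < 2147483648 ∨ k.toNat ≤ 31 := by omega
      rw [fB_eq k.toNat i 0 1 h]
      ring
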